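-- pv_equiv track=rewrite | github.com/JRudyRay/Projects_Master_CBB | Data Mining/HW05_Kernels/HW05_Exercise_3c.py | kernel_GXY
-- ===== SOURCE A (Python) =====
-- def kernel_GXY(string1, string2):
--
--     x = list(string1)
--     y = list(string2)
--     length = len(x)
--     counter = 0
--     for i in range(0, length-2):
--         for j in range(0, length-2):
--
--             if x[i] == 'G' and y[j] == 'G': # first value must be a G
--                 counter += 1
--
--                 if x[i+1] == y[j+1]:
--                     counter += 1
--
--                 if x[i+2] == y[j+2]:
--                     counter += 1
--             else:
--                 continue
--     return counter
-- ===== SOURCE B (Python) =====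
-- def kernel_GXY(string1, string2):
--     n = len(string1)
--     anchors = [i for i in range(n - 2) if string1[i] == 'G']
--     if not anchors:
--         return 0
--     gy = 0           # number of G-anchored windows scanned in string2[:n-2]
--     cy1 = {}         # counts of the char right after each such G
--     cy2 = {}         # counts of the char two after each such G
--     for j in range(n - 2):
--         if string2[j] == 'G':
--             gy += 1
--             c1 = string2[j + 1]
--             cy1[c1] = cy1.get(c1, 0) + 1
--             c2 = string2[j + 2]
--             cy2[c2] = cy2.get(c2, 0) + 1
--     return sum(gy + cy1.get(string1[i + 1], 0) + cy2.get(string1[i + 2], 0)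
--                for i in anchors)
-- ===== Notes on version B (the rewrite author's own statement) =====
-- stated objective: faster
-- what changed: Replaces the quadratic double loop over (i,j) pairs by collecting string1's G-anchors (returning 0 if none), one pass over string2 building a G-count and two per-character counters, and a sum of gy + cy1[x[i+1]] + cy2[x[i+2]] over the anchors.
import Mathlib
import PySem

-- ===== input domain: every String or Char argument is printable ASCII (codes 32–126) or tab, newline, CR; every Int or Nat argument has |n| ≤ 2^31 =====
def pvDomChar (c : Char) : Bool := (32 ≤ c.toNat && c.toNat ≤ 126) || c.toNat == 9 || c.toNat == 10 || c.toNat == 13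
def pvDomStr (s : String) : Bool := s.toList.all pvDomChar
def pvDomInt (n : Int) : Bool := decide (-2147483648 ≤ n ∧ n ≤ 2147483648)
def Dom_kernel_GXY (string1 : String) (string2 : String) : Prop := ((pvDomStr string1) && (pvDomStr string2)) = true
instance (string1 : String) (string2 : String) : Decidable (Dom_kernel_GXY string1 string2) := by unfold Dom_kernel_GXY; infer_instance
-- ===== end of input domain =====

-- B replaces A's quadratic double loop by: collect string1's G-anchors, return 0 if none,
-- else one counting pass over string2 (G-count + two per-character counters) and a sum over
-- the anchors; proved equal to A on Pre_ (exactly the inputs where A returns).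


-- ===== PORT A =====
-- literal transliteration of A's nested loops; list indexing x[k]/y[k] is List.getD with a
-- dummy default — exact wherever Python does not raise (Pre_ excludes the raising inputs)
def kernel_GXY (string1 : String) (string2 : String) : Int :=
  let x := string1.toList
  let y := string2.toList
  let length := x.length
  (List.range (length - 2)).foldl (fun counter i =>
    (List.range (length - 2)).foldl (fun counter j =>
      if x.getD i ' ' = 'G' ∧ y.getD j ' ' = 'G' then
        let counter := counter + 1
        let counter := if x.getD (i+1) ' ' = y.getD (j+1) ' ' then counter + 1 else counter
        if x.getD (i+2) ' ' = y.getD (j+2) ' ' then counter + 1 else counter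
      else counter) counter) 0

-- ===== PORT B =====
-- transliteration of Source B: anchors of string1 first (0 if none), then one counting pass over
-- string2 (state = gy, cy1, cy2), then a sum over the anchors
def kernel_GXY_alt (string1 : String) (string2 : String) : Int :=
  let s1 := string1.toList
  let s2 := string2.toList
  let n := s1.length
  let anchors := (List.range (n - 2)).filter (fun i => decide (s1.getD i ' ' = 'G'))
  if anchors.isEmpty then 0
  else
    let st := (List.range (n - 2)).foldl
      (fun (st : Int × PySem.Dict Char Int × PySem.Dict Char Int) j =>
        if s2.getD j ' ' = 'G' then
          let c1 := s2.getD (j+1) ' '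
          let c2 := s2.getD (j+2) ' '
          (st.1 + 1, st.2.1.insert c1 (st.2.1.getD c1 0 + 1), st.2.2.insert c2 (st.2.2.getD c2 0 + 1))
        else st)
      (0, PySem.Dict.empty, PySem.Dict.empty)
    (anchors.map (fun i =>
      st.1 + st.2.1.getD (s1.getD (i+1) ' ') 0 + st.2.2.getD (s1.getD (i+2) ' ') 0)).sum

-- ===== PRECONDITION & SPEC =====
-- Pre_ excludes exactly the inputs on which A raises IndexError: string1 has a 'G' anchor in
-- its first n-2 positions, and string2 is too short for the inner loop's reads (some j < n-2
-- beyond string2, or a 'G' at j in string2 without two following characters).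
def Pre_kernel_GXY (string1 : String) (string2 : String) : Prop :=
  (∀ i ∈ List.range (string1.toList.length - 2), string1.toList.getD i ' ' ≠ 'G') ∨
    (string1.toList.length - 2 ≤ string2.toList.length ∧
      ∀ j ∈ List.range (string1.toList.length - 2),
        string2.toList.getD j ' ' = 'G' → j + 3 ≤ string2.toList.length)
instance (string1 : String) (string2 : String) : Decidable (Pre_kernel_GXY string1 string2) := by
  unfold Pre_kernel_GXY; infer_instance
def pvWitness_kernel_GXY : String × String := ("GAG", "GAG")

def Spec_kernel_GXY (string1 : String) (string2 : String) (out : Int) : Prop := out = kernel_GXY_alt string1 string2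
instance (string1 : String) (string2 : String) (out : Int) : Decidable (Spec_kernel_GXY string1 string2 out) := by unfold Spec_kernel_GXY; infer_instance

-- ===== CLAIM (what is proved, stated in full; the proofs are below) =====
def Claim_equal_kernel_GXY : Prop := ∀ (string1 : String) (string2 : String), Dom_kernel_GXY string1 string2 → Pre_kernel_GXY string1 string2 → Spec_kernel_GXY string1 string2 (kernel_GXY string1 string2)

-- ===== LEMMAS AND PROOFS =====

-- A's inner loop (for a fixed i with x[i]=='G') counted by three countP's
lemma innerA (L : List Nat) (c0 : Int) (p q r : Nat → Prop)
    [DecidablePred p] [DecidablePred q] [DecidablePred r] :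
    L.foldl (fun counter j =>
      if p j then
        if r j then (if q j then counter + 1 + 1 else counter + 1) + 1
        else if q j then counter + 1 + 1 else counter + 1
      else counter) c0
    = c0 + (L.countP (fun j => decide (p j)) : Int)
         + (L.countP (fun j => decide (p j) && decide (q j)) : Int)
         + (L.countP (fun j => decide (p j) && decide (r j)) : Int) := by
  induction L generalizing c0 with
  | nil => simp
  | cons j t ih =>
    simp only [List.foldl_cons, List.countP_cons, ih]
    by_cases hp : p j
    · by_cases hq : q j <;> by_cases hr : r j <;> simp [hp, hq, hr] <;> omega
    · simp [hp]

-- B's counting loop over string2 characterized: the running G-count and both counters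
lemma b_state_loop (L : List Nat) (p : Nat → Prop) [DecidablePred p] (k1 k2 : Nat → Char)
    (g : Int) (d1 d2 : PySem.Dict Char Int) (a b : Char) :
    ((L.foldl (fun (st : Int × PySem.Dict Char Int × PySem.Dict Char Int) j =>
        if p j then
          (st.1 + 1, st.2.1.insert (k1 j) (st.2.1.getD (k1 j) 0 + 1),
           st.2.2.insert (k2 j) (st.2.2.getD (k2 j) 0 + 1))
        else st) (g, d1, d2)).1 = g + (L.countP (fun j => decide (p j)) : Int))
  ∧ ((L.foldl (fun (st : Int × PySem.Dict Char Int × PySem.Dict Char Int) j =>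
        if p j then
          (st.1 + 1, st.2.1.insert (k1 j) (st.2.1.getD (k1 j) 0 + 1),
           st.2.2.insert (k2 j) (st.2.2.getD (k2 j) 0 + 1))
        else st) (g, d1, d2)).2.1.getD a 0
      = d1.getD a 0 + (L.countP (fun j => decide (p j) && decide (a = k1 j)) : Int))
  ∧ ((L.foldl (fun (st : Int × PySem.Dict Char Int × PySem.Dict Char Int) j =>
        if p j then
          (st.1 + 1, st.2.1.insert (k1 j) (st.2.1.getD (k1 j) 0 + 1),
           st.2.2.insert (k2 j) (st.2.2.getD (k2 j) 0 + 1))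
        else st) (g, d1, d2)).2.2.getD b 0
      = d2.getD b 0 + (L.countP (fun j => decide (p j) && decide (b = k2 j)) : Int)) := by
  induction L generalizing g d1 d2 with
  | nil => simp
  | cons j t ih =>
    simp only [List.foldl_cons, List.countP_cons]
    by_cases hp : p j
    · obtain ⟨h1, h2, h3⟩ := ih (g + 1)
        (d1.insert (k1 j) (d1.getD (k1 j) 0 + 1)) (d2.insert (k2 j) (d2.getD (k2 j) 0 + 1))
      refine ⟨?_, ?_, ?_⟩
      · simp only [hp, if_true, h1, decide_true]
        push_cast; omega
      · simp only [hp, if_true, decide_true, Bool.true_and]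
        rw [h2, PySem.Dict.getD_insert]
        by_cases ha : a = k1 j <;> simp [ha] <;> omega
      · simp only [hp, if_true, decide_true, Bool.true_and]
        rw [h3, PySem.Dict.getD_insert]
        by_cases hb : b = k2 j <;> simp [hb] <;> omega
    · simpa [hp] using ih g d1 d2

-- a guarded accumulating fold over a list equals the sum of the mapped filter
lemma foldl_if_sum (L : List Nat) (p : Nat → Bool) (f : Nat → Int) (c : Int) :
    L.foldl (fun t i => if p i then t + f i else t) c
      = c + ((L.filter p).map f).sum := by
  induction L generalizing c with
  | nil => simp
  | cons i t ih =>
    by_cases hp : p i <;> simp [hp, ih, List.filter_cons] <;> omega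

-- the whole equality, stated over the underlying character lists: A's double loop equals
-- B's anchors/counters computation
lemma key_lists (x y : List Char) :
    (List.range (x.length - 2)).foldl (fun counter i =>
      (List.range (x.length - 2)).foldl (fun counter j =>
        if x.getD i ' ' = 'G' ∧ y.getD j ' ' = 'G' then
          let counter := counter + 1
          let counter := if x.getD (i+1) ' ' = y.getD (j+1) ' ' then counter + 1 else counter
          if x.getD (i+2) ' ' = y.getD (j+2) ' ' then counter + 1 else counter
        else counter) counter) 0
  = (let anchors := (List.range (x.length - 2)).filter (fun i => decide (x.getD i ' ' = 'G'))
     if anchors.isEmpty then 0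
     else
       let st := (List.range (x.length - 2)).foldl
         (fun (st : Int × PySem.Dict Char Int × PySem.Dict Char Int) j =>
           if y.getD j ' ' = 'G' then
             let c1 := y.getD (j+1) ' '
             let c2 := y.getD (j+2) ' '
             (st.1 + 1, st.2.1.insert c1 (st.2.1.getD c1 0 + 1), st.2.2.insert c2 (st.2.2.getD c2 0 + 1))
           else st)
         (0, PySem.Dict.empty, PySem.Dict.empty)
       ((anchors.map (fun i =>
         st.1 + st.2.1.getD (x.getD (i+1) ' ') 0 + st.2.2.getD (x.getD (i+2) ' ') 0)).sum)) := by
  -- abbreviate B's state and the per-anchor contribution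
  set st := (List.range (x.length - 2)).foldl
    (fun (st : Int × PySem.Dict Char Int × PySem.Dict Char Int) j =>
      if y.getD j ' ' = 'G' then
        let c1 := y.getD (j+1) ' '
        let c2 := y.getD (j+2) ' '
        (st.1 + 1, st.2.1.insert c1 (st.2.1.getD c1 0 + 1), st.2.2.insert c2 (st.2.2.getD c2 0 + 1))
      else st)
    (0, PySem.Dict.empty, PySem.Dict.empty) with hst
  have hA :
      (List.range (x.length - 2)).foldl (fun counter i =>
        (List.range (x.length - 2)).foldl (fun counter j =>
          if x.getD i ' ' = 'G' ∧ y.getD j ' ' = 'G' then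
            let counter := counter + 1
            let counter := if x.getD (i+1) ' ' = y.getD (j+1) ' ' then counter + 1 else counter
            if x.getD (i+2) ' ' = y.getD (j+2) ' ' then counter + 1 else counter
          else counter) counter) 0
    = (List.range (x.length - 2)).foldl (fun total i =>
        if decide (x.getD i ' ' = 'G') then
          total + (st.1 + st.2.1.getD (x.getD (i+1) ' ') 0 + st.2.2.getD (x.getD (i+2) ' ') 0)
        else total) 0 := by
    refine PySem.List.foldl_congr_mem' _ _ _ _ ?_
    intro i _ acc
    beta_reduce
    by_cases hx : x.getD i ' ' = 'G'
    · rw [if_pos (by simpa using hx)]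
      rw [PySem.List.foldl_congr_mem' _ _ (fun (counter : Int) j =>
          if y.getD j ' ' = 'G' then
            if x.getD (i+2) ' ' = y.getD (j+2) ' ' then
              (if x.getD (i+1) ' ' = y.getD (j+1) ' ' then counter + 1 + 1 else counter + 1) + 1
            else if x.getD (i+1) ' ' = y.getD (j+1) ' ' then counter + 1 + 1 else counter + 1
          else counter) _ ?step]
      · rw [innerA]
        obtain ⟨h1, h2, h3⟩ := b_state_loop (List.range (x.length - 2))
          (fun j => y.getD j ' ' = 'G') (fun j => y.getD (j+1) ' ') (fun j => y.getD (j+2) ' ')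
          0 PySem.Dict.empty PySem.Dict.empty (x.getD (i+1) ' ') (x.getD (i+2) ' ')
        rw [hst, h1, h2, h3]
        simp only [PySem.Dict.getD_empty, zero_add]
        ring
      · intro j _ c
        by_cases hp : y.getD j ' ' = 'G'
        · rw [if_pos ⟨hx, hp⟩]
          beta_reduce
          rw [if_pos hp]
        · rw [if_neg (fun h => hp h.2)]
          beta_reduce
          rw [if_neg hp]
    · rw [if_neg (by simpa using hx),
        PySem.List.foldl_congr_mem' _ _ (fun (c : Int) (_ : Nat) => c) _
          (fun j _ c => if_neg (fun h => hx h.1)),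
        PySem.List.foldl_ignore]
  rw [hA, foldl_if_sum, zero_add]
  by_cases he : ((List.range (x.length - 2)).filter
      (fun i => decide (x.getD i ' ' = 'G'))).isEmpty
  · rw [if_pos he, List.isEmpty_iff.mp he]; simp
  · rw [if_neg he]

-- ===== VERDICT (by name: the statement is the Claim_ definition above) =====
theorem kernel_GXY_spec : Claim_equal_kernel_GXY := by
  intro string1 string2 _ _
  show kernel_GXY string1 string2 = kernel_GXY_alt string1 string2
  exact key_lists string1.toList string2.toList
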